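-- pv_equiv track=rewrite | github.com/hschong/Algorithms | insertBall.py | processBeads
-- ===== SOURCE A (Python) =====
-- class ListPipe:
--     def __init__(self):
--         self.pipe = []
--
--     def addLeft(self, number):
--         # Add operation: 1+2+3+4+5+6+ ... + n = n(n+1)/2, O(n**2)
--         self.pipe = [number] + self.pipe
--
--     def addRight(self, number):
--         # 1+1+1 + ... + 1 = n, O(n)
--         self.pipe.append(number)
--
--     def getBeads(self):
--         return self.pipe
--
-- def processBeads(myInput):
--     '''
--     myInput[i][0] : Elements' index
--     myInput[i][1] : Direction to add, 0 : left, 1 : right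
--
--     myInput[0][0] = 1, myInput[0][1] = 0,
--     myInput[1][0] = 2, myInput[1][1] = 1,
--     myInput[2][0] = 3, myInput[2][1] = 0
--
--     myInput[0] = ball = [1, 0]
--     myInput[1] = ball = [2, 1]
--     myInput[2] = ball = [3, 0]
--     [[1,0], [2,1], [3,0]]
--     '''
--
--     myPipe = ListPipe()
--
--     for ball in myInput:
--         if ball[1] == 0:
--             myPipe.addLeft(ball[0])
--         else:
--             myPipe.addRight(ball[0])
--
--     return myPipe.getBeads()
-- ===== SOURCE B (Python) =====
-- def processBeads(myInput):
--     left = []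
--     right = []
--     for ball in myInput:
--         d = ball[1]
--         v = ball[0]
--         if d == 0:
--             left.append(v)
--         else:
--             right.append(v)
--     return left[::-1] + right
-- ===== Notes on version B (the rewrite author's own statement) =====
-- stated objective: simpler
-- what changed: Replaces the ListPipe class with its incremental prepend/append by a single pass collecting two buckets (left-direction and right-direction values) combined once at the end as left[::-1] + right.
-- outside the precondition, e.g. on processBeads([[1]]): A raises IndexError, B raises IndexError
import Mathlib
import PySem

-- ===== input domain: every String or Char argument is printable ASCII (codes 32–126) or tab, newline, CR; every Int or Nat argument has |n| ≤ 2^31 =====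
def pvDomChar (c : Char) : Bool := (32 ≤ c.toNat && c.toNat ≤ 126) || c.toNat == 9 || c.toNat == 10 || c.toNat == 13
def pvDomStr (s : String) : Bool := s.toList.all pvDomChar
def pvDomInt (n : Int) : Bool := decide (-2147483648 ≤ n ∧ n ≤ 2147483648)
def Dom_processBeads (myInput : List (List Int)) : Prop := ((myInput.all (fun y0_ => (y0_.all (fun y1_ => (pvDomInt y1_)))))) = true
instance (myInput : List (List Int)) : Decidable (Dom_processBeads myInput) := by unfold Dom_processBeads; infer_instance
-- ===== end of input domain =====

-- B replaces A's incremental ListPipe prepend/append with two buckets combined once at the end; objective: simpler.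
-- ===== PORT A =====
-- A's loop over balls, pipe state updated by addLeft ([number] + pipe) or addRight (pipe.append).
-- ball[1]/ball[0] are ported with pyGet? (IndexError → none); Pre_ keeps every ball long enough,
-- so the .getD 0 default is never reached on admitted inputs.
def processBeads (myInput : List (List Int)) : List Int :=
  myInput.foldl (fun pipe ball =>
    if (PySem.List.pyGet? ball 1).getD 0 = 0 then
      [(PySem.List.pyGet? ball 0).getD 0] ++ pipe
    else
      pipe ++ [(PySem.List.pyGet? ball 0).getD 0]) []

-- ===== PORT B =====
def processBeads_alt (myInput : List (List Int)) : List Int :=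
  let p := myInput.foldl (fun (lr : List Int × List Int) ball =>
    let d := (PySem.List.pyGet? ball 1).getD 0
    let v := (PySem.List.pyGet? ball 0).getD 0
    if d = 0 then (lr.1 ++ [v], lr.2) else (lr.1, lr.2 ++ [v])) ([], [])
  p.1.reverse ++ p.2

-- ===== PRECONDITION & SPEC =====
-- Pre_ excludes inputs with a ball of fewer than 2 elements, on which Python A raises IndexError.
def Pre_processBeads (myInput : List (List Int)) : Prop :=
  ∀ ball ∈ myInput, 2 ≤ ball.length
instance (myInput : List (List Int)) : Decidable (Pre_processBeads myInput) := by
  unfold Pre_processBeads; infer_instance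
def pvWitness_processBeads : List (List Int) := [[1, 0], [2, 1], [3, 0]]

def Spec_processBeads (myInput : List (List Int)) (out : List Int) : Prop := out = processBeads_alt myInput
instance (myInput : List (List Int)) (out : List Int) : Decidable (Spec_processBeads myInput out) := by unfold Spec_processBeads; infer_instance

-- ===== CLAIM (what is proved, stated in full; the proofs are below) =====
def Claim_equal_processBeads : Prop := ∀ (myInput : List (List Int)), Dom_processBeads myInput → Pre_processBeads myInput → Spec_processBeads myInput (processBeads myInput)

-- ===== LEMMAS AND PROOFS =====
-- Loop invariant tying A's single pipe to B's pair of buckets.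
theorem pipe_buckets (myInput : List (List Int)) (l r : List Int) :
    myInput.foldl (fun pipe ball =>
      if (PySem.List.pyGet? ball 1).getD 0 = 0 then
        [(PySem.List.pyGet? ball 0).getD 0] ++ pipe
      else
        pipe ++ [(PySem.List.pyGet? ball 0).getD 0]) (l.reverse ++ r)
    = (myInput.foldl (fun (lr : List Int × List Int) ball =>
        let d := (PySem.List.pyGet? ball 1).getD 0
        let v := (PySem.List.pyGet? ball 0).getD 0
        if d = 0 then (lr.1 ++ [v], lr.2) else (lr.1, lr.2 ++ [v])) (l, r)).1.reverse
      ++ (myInput.foldl (fun (lr : List Int × List Int) ball =>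
        let d := (PySem.List.pyGet? ball 1).getD 0
        let v := (PySem.List.pyGet? ball 0).getD 0
        if d = 0 then (lr.1 ++ [v], lr.2) else (lr.1, lr.2 ++ [v])) (l, r)).2 := by
  induction myInput generalizing l r with
  | nil => simp
  | cons ball rest ih =>
    simp only [List.foldl_cons]
    by_cases h : (PySem.List.pyGet? ball 1).getD 0 = 0
    · simpa [h] using ih (l ++ [(PySem.List.pyGet? ball 0).getD 0]) r
    · simpa [h] using ih l (r ++ [(PySem.List.pyGet? ball 0).getD 0])

-- ===== VERDICT (by name: the statement is the Claim_ definition above) =====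
theorem processBeads_spec : Claim_equal_processBeads := by
  intro myInput _ _
  unfold Spec_processBeads processBeads processBeads_alt
  simpa using pipe_buckets myInput [] []
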